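-- pv_equiv track=rewrite | github.com/OrenYacouel/radicalization-of-public-discourse | try.py | dict_maker_from_string
-- ===== SOURCE A (Python) =====
-- def dict_maker_from_string(input_string):
--     responses = {}
--     lines = input_string.strip().split("\n")
--     i = 0
--     while i < len(lines):
--         political_view = lines[i].strip(":")
--         i += 1
--         response_array = []
--         for j in range(3):
--             response = lines[i].strip()
--             i += 1
--             response_array.append(response)
--         responses[political_view] = response_array
--     return responses
-- ===== SOURCE B (Python) =====
-- def dict_maker_from_string(input_string):
--     lines = input_string.strip().split("\n")
--     keys = [h.strip(":") for h in lines[0::4]]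
--     answers = zip((r.strip() for r in lines[1::4]),
--                   (r.strip() for r in lines[2::4]),
--                   (r.strip() for r in lines[3::4]), strict=True)
--     return dict(zip(keys, map(list, answers), strict=True))
-- ===== Notes on version B (the rewrite author's own statement) =====
-- stated objective: alternative
-- what changed: Instead of one pointer-threaded while-loop reading lines sequentially, B slices the line list into four step-4 columns (keys and the three response columns) in separate passes and zips them back together (strict) into the dict; Pre_ excludes inputs whose stripped line count is not a multiple of 4, where A raises IndexError and B raises ValueError.
import Mathlib
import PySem

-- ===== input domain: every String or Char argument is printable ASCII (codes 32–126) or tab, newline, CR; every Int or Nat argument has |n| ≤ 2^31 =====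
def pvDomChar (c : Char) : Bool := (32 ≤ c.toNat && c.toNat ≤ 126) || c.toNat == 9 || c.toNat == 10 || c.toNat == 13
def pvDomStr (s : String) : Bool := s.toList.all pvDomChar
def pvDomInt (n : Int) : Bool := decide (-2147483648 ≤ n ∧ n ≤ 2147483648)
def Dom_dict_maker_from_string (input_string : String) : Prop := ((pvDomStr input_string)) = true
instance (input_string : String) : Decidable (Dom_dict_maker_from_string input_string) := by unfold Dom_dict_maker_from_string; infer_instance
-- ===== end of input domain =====

-- B replaces A's pointer-threaded while-loop (one sequential scan of the lines) with four
-- step-4 column slices (keys, and the three response columns) zipped back into the dict.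

-- ===== PORT A =====
-- A's while loop: state is (i, responses); the inner `for j in range(3)` threads (i, response_array).
-- lines[i] raises IndexError in Python when out of range; Pre_ keeps every access in range, so the
-- pyGetD default "" is never read inside Pre_.
def dictMakerLoopA (lines : List String) (d : PySem.Dict String (List String)) (i : Nat) :
    PySem.Dict String (List String) :=
  if _h : i < lines.length then
    let political_view := PySem.Str.stripChars (PySem.List.pyGetD lines (i : Int) "") ":"
    -- for j in range(3): response_array.append(lines[i].strip()); i += 1
    let st := (PySem.List.pyRange 0 3 1).foldl
      (fun (p : Nat × List String) _ =>
        (p.1 + 1, p.2 ++ [PySem.Str.strip (PySem.List.pyGetD lines (p.1 : Int) "")]))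
      (i + 1, [])
    dictMakerLoopA lines (d.insert political_view st.2) st.1
  else d
termination_by lines.length - i
decreasing_by simp [PySem.List.pyRange, List.range, List.range.loop, List.foldl] at *; omega

def dict_maker_from_string (input_string : String) : List (String × List String) :=
  -- input_string.strip().split("\n"): the separator is the nonempty literal "\n", so split? is `some`
  let lines := (PySem.Str.split? (PySem.Str.strip input_string) "\n").getD []
  (dictMakerLoopA lines PySem.Dict.empty 0).items

-- ===== PORT B =====
-- Source B: keys = lines[0::4] stripped of ':'; three stripped response columns lines[1::4],
-- lines[2::4], lines[3::4]; zip the columns into triples and zip keys with them into the dict.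
-- Source B's zip(…, strict=True) raises ValueError on unequal lengths — outside Pre_; it is ported
-- as List.zip, exact wherever the zipped lists have equal length (always the case inside Pre_).
def dict_maker_from_string_alt (input_string : String) : List (String × List String) :=
  let lines := (PySem.Str.split? (PySem.Str.strip input_string) "\n").getD []
  let keys := ((PySem.List.slice? lines (some 0) none 4).getD []).map
    (fun h => PySem.Str.stripChars h ":")
  let c1 := ((PySem.List.slice? lines (some 1) none 4).getD []).map PySem.Str.strip
  let c2 := ((PySem.List.slice? lines (some 2) none 4).getD []).map PySem.Str.strip
  let c3 := ((PySem.List.slice? lines (some 3) none 4).getD []).map PySem.Str.strip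
  -- zip(c1, c2, c3, strict=True) with map(list, …): triples turned into 3-element lists
  let answers := (c1.zip (c2.zip c3)).map (fun t => [t.1, t.2.1, t.2.2])
  -- dict(zip(keys, answers, strict=True))
  ((keys.zip answers).foldl (fun (d : PySem.Dict String (List String)) kv => d.insert kv.1 kv.2)
    PySem.Dict.empty).items

-- ===== PRECONDITION & SPEC =====
-- Python A raises IndexError (and B ValueError) exactly when the number of lines of the stripped
-- input is not a multiple of 4; Pre_ excludes exactly those inputs (A returns on everything it admits).
def Pre_dict_maker_from_string (input_string : String) : Prop :=
  ((PySem.Str.split? (PySem.Str.strip input_string) "\n").getD []).length % 4 = 0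
instance (input_string : String) : Decidable (Pre_dict_maker_from_string input_string) := by
  unfold Pre_dict_maker_from_string; infer_instance
def pvWitness_dict_maker_from_string : String := String.ofList ['k', ':', '\n', 'a', '\n', 'b', '\n', 'c']

def Spec_dict_maker_from_string (input_string : String) (out : List (String × List String)) : Prop := out = dict_maker_from_string_alt input_string
instance (input_string : String) (out : List (String × List String)) : Decidable (Spec_dict_maker_from_string input_string out) := by unfold Spec_dict_maker_from_string; infer_instance

-- ===== CLAIM (what is proved, stated in full; the proofs are below) =====
def Claim_equal_dict_maker_from_string : Prop := ∀ (input_string : String), Dom_dict_maker_from_string input_string → Pre_dict_maker_from_string input_string → Spec_dict_maker_from_string input_string (dict_maker_from_string input_string)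

-- ===== LEMMAS AND PROOFS =====

-- A's inner 3-step fold, started at index i+1, reads lines i+1, i+2, i+3 and lands on i+4.
lemma dictMaker_inner (lines : List String) (i : Nat) :
    (PySem.List.pyRange 0 3 1).foldl
      (fun (p : Nat × List String) _ =>
        (p.1 + 1, p.2 ++ [PySem.Str.strip (PySem.List.pyGetD lines (p.1 : Int) "")]))
      (i + 1, [])
    = (i + 4,
       [PySem.Str.strip (PySem.List.pyGetD lines ((i : Int) + 1) ""),
        PySem.Str.strip (PySem.List.pyGetD lines ((i : Int) + 2) ""),
        PySem.Str.strip (PySem.List.pyGetD lines ((i : Int) + 3) "")]) := by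
  have h3 : PySem.List.pyRange 0 3 1 = [0, 1, 2] := by decide
  rw [h3]
  simp only [List.foldl]
  push_cast
  rfl

-- range(a, b, 4) induction forms
lemma pyRange_four_nil (a b : Int) (h : ¬ a < b) : PySem.List.pyRange a b 4 = [] := by
  rw [PySem.List.pyRange_of_pos a b (by norm_num)]
  simp [if_neg h]

lemma pyRange_four_cons (a b : Int) (h : a < b) :
    PySem.List.pyRange a b 4 = a :: PySem.List.pyRange (a + 4) b 4 := by
  rw [PySem.List.pyRange_of_pos a b (by norm_num), PySem.List.pyRange_of_pos (a + 4) b (by norm_num)]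
  by_cases h4 : a + 4 < b
  · have hc : ((b - a + 4 - 1) / 4).toNat = ((b - (a + 4) + 4 - 1) / 4).toNat + 1 := by omega
    simp only [if_pos h, if_pos h4, hc, List.range_succ_eq_map, List.map_cons, List.map_map]
    norm_num
    intro k _
    ring
  · have hc : ((b - a + 4 - 1) / 4).toNat = 1 := by omega
    simp [if_pos h, if_neg h4, hc, List.range_succ]

-- A's while loop from index i is the fold over the chunk starts pyRange i len 4.
lemma dictMaker_loop_eq_fold (lines : List String) (d : PySem.Dict String (List String)) (i : Nat) :
    dictMakerLoopA lines d i =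
      (PySem.List.pyRange (i : Int) (lines.length : Int) 4).foldl
        (fun (d : PySem.Dict String (List String)) j =>
          d.insert (PySem.Str.stripChars (PySem.List.pyGetD lines j "") ":")
            [PySem.Str.strip (PySem.List.pyGetD lines (j + 1) ""),
             PySem.Str.strip (PySem.List.pyGetD lines (j + 2) ""),
             PySem.Str.strip (PySem.List.pyGetD lines (j + 3) "")]) d := by
  rw [dictMakerLoopA]
  by_cases h : i < lines.length
  · simp only [dif_pos h, dictMaker_inner]
    rw [pyRange_four_cons (i : Int) (lines.length : Int) (by exact_mod_cast h), List.foldl_cons]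
    have ih := dictMaker_loop_eq_fold lines
      (d.insert (PySem.Str.stripChars (PySem.List.pyGetD lines (i : Int) "") ":")
        [PySem.Str.strip (PySem.List.pyGetD lines ((i : Int) + 1) ""),
         PySem.Str.strip (PySem.List.pyGetD lines ((i : Int) + 2) ""),
         PySem.Str.strip (PySem.List.pyGetD lines ((i : Int) + 3) "")]) (i + 4)
    push_cast at ih
    exact ih
  · rw [dif_neg h, pyRange_four_nil (i : Int) (lines.length : Int) (by exact_mod_cast h)]
    rfl
termination_by lines.length - i
decreasing_by omega

-- The chunk starts range(0, 4m, 4) is the image of range m under k ↦ 4k.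
lemma pyRange_step4 (m : Nat) :
    PySem.List.pyRange 0 (4 * (m : Int)) 4 = (List.range m).map (fun k : Nat => (4 * (k : Int) : Int)) := by
  rw [PySem.List.pyRange_of_pos 0 (4 * (m : Int)) (by norm_num)]
  have hcnt : (if (0 : Int) < 4 * (m : Int) then ((4 * (m : Int) - 0 + 4 - 1) / 4).toNat else 0) = m := by
    split_ifs with h <;> omega
  rw [hcnt]
  simp only [zero_add]

-- An extended slice xs[o::4] of a list of length 4m, for 0 ≤ o < 4, is the column k ↦ xs.getD (o+4k).
lemma slice_step4 (xs : List String) (o m : Nat) (ho : o < 4) (hL : xs.length = 4 * m) :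
    (PySem.List.slice? xs (some (o : Int)) none 4).getD []
      = (List.range m).map (fun k => xs.getD (o + 4 * k) "") := by
  have h40 : ¬((4 : Int) = 0) := by norm_num
  have h4n : ¬((4 : Int) < 0) := by norm_num
  have h4p : (0 : Int) < 4 := by norm_num
  simp only [PySem.List.slice?, PySem.List.sliceIndices, if_neg h40, if_neg h4n, if_pos h4p,
    Option.getD_some]
  have hneg : ¬((o : Int) < 0) := by omega
  simp only [if_neg hneg]
  by_cases hm : 0 < m
  · have hstart : min (o : Int) (xs.length : Int) = (o : Int) := by
      rw [hL]; push_cast; omega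
    rw [hstart]
    have hlt : (o : Int) < (xs.length : Int) := by rw [hL]; push_cast; omega
    have hc : (((xs.length : Int) - (o : Int) + 4 - 1) / 4).toNat = m := by
      rw [hL]; push_cast; omega
    rw [if_pos hlt, hc]
    rw [List.filterMap_congr (g := fun k => some (xs.getD (o + 4 * k) ""))]
    · exact congrFun (List.filterMap_eq_map (f := fun k => xs.getD (o + 4 * k) "")) (List.range m)
    · intro k hk
      rw [List.mem_range] at hk
      have hidx : ((o : Int) + 4 * (k : Int)).toNat = o + 4 * k := by omega
      have hb : o + 4 * k < xs.length := by omega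
      rw [hidx, List.getElem?_eq_getElem hb, List.getD_eq_getElem _ _ hb]
  · have hm0 : m = 0 := by omega
    subst hm0
    have hx : xs = [] := by
      cases xs with
      | nil => rfl
      | cons a t => simp at hL
    subst hx
    simp

-- pyGetD at a natural index (cast through Int arithmetic) is getD.
lemma pyGetD_nat_add (xs : List String) (o k : Nat) :
    PySem.List.pyGetD xs ((4 * (k : Int)) + (o : Int)) "" = xs.getD (o + 4 * k) "" := by
  have h : (4 * (k : Int)) + (o : Int) = ((o + 4 * k : Nat) : Int) := by push_cast; ring
  rw [h, PySem.List.pyGetD_natCast]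

-- ===== VERDICT (by name: the statement is the Claim_ definition above) =====
theorem dict_maker_from_string_spec : Claim_equal_dict_maker_from_string := by
  intro s _ hpre
  unfold Spec_dict_maker_from_string dict_maker_from_string dict_maker_from_string_alt
  unfold Pre_dict_maker_from_string at hpre
  set lines := (PySem.Str.split? (PySem.Str.strip s) "\n").getD [] with hlines
  obtain ⟨m, hm⟩ : ∃ m, lines.length = 4 * m := ⟨lines.length / 4, by omega⟩
  simp only [dictMaker_loop_eq_fold, Nat.cast_zero, hm]
  have s0 := slice_step4 lines 0 m (by omega) hm
  have s1 := slice_step4 lines 1 m (by omega) hm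
  have s2 := slice_step4 lines 2 m (by omega) hm
  have s3 := slice_step4 lines 3 m (by omega) hm
  push_cast at s0 s1 s2 s3
  rw [s0, s1, s2, s3]
  have hcast : ((4 * m : Nat) : Int) = 4 * (m : Int) := by push_cast; ring
  rw [hcast, pyRange_step4]
  simp only [List.map_map, List.zip_map', List.map_map, List.foldl_map]
  refine congrArg PySem.Dict.items (List.foldl_ext _ _ _ ?_)
  intro d k _
  simp only [Function.comp]
  rw [← pyGetD_nat_add lines 0 k, ← pyGetD_nat_add lines 1 k, ← pyGetD_nat_add lines 2 k,
      ← pyGetD_nat_add lines 3 k]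
  norm_num
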